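-- pv_equiv track=rewrite | github.com/Dis-count/HKUST_TOPIC | Programming_after/CodeDeterministic/MultiKnapsack.py | transInv
-- ===== SOURCE A (Python) =====
-- def binaryDecomposition(n):  # binaryDecomposition to
--      k = 0
--      res = []
--      while n - 2**(k+1) + 1  > 0:
--          res.append(2**k)
--          k += 1
--      res.append(n - 2 ** (k) + 1)
--      return res
--
-- def transInv(numList, indexNum):
--     newList = []
--     num_i = [0]*(len(numList)+1)
--     for i in range(len(numList)):
--         for j in binaryDecomposition(numList[i]):
--             newList.append(j)
--         num_i[i+1] = len(newList)
--     sum_list = [0]*len(numList)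
--
--     for j in range(len(numList)-1,-1,-1):
--         for i in indexNum:
--             if  num_i[j] < i <= num_i[j+1]:
--                 sum_list[j] += newList[i-1]
-- # The Complexity need to be revised
--     return sum_list
-- ===== SOURCE B (Python) =====
-- def _decomp(n):
--     k = 0
--     res = []
--     while n - 2**(k+1) + 1 > 0:
--         res.append(2**k)
--         k += 1
--     res.append(n - 2**k + 1)
--     return res
--
-- def transInv(numList, indexNum):
--     # One pass builds the flattened weight list together with an "owner" table
--     # mapping each 1-based position to its segment; each index is then
--     # dispatched in O(1) instead of being scanned against every segment.
--     parts = [_decomp(n) for n in numList]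
--     newList = []
--     owner = []
--     for j, p in enumerate(parts):
--         newList.extend(p)
--         owner.extend([j] * len(p))
--     out = [0] * len(numList)
--     total = len(newList)
--     for i in indexNum:
--         if 0 < i <= total:
--             out[owner[i - 1]] += newList[i - 1]
--     return out
-- ===== Notes on version B (the rewrite author's own statement) =====
-- stated objective: faster
-- what changed: Replaces A's nested scan (for every segment j, rescan all of indexNum against the cumulative bounds) by a precomputed owner table mapping each flattened position to its segment, so each index is dispatched to its segment in O(1) in a single pass.
import Mathlib
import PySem

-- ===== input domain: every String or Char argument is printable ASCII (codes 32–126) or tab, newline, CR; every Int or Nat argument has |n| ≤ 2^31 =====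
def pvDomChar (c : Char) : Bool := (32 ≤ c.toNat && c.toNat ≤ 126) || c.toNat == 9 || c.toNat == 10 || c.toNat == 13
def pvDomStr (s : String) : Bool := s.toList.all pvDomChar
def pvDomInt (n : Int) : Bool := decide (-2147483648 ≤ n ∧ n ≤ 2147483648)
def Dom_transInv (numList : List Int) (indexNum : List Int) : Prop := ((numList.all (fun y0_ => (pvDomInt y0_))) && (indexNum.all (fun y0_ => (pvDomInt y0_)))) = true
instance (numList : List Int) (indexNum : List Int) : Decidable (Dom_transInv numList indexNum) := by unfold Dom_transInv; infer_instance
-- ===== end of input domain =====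

-- B replaces A's nested segment×index scan by a precomputed owner table, dispatching each
-- index to its segment in O(1); same return value on every input (both programs are total).

-- ===== PORT A =====
-- while-loop of Python's binaryDecomposition, step for step; it terminates because
-- 2^(k+1) eventually exceeds n (measure n.toNat - 2^k).
def binDecAux (n : Int) (k : Nat) : List Int :=
  if n - 2 ^ (k + 1) + 1 > 0 then
    (2 : Int) ^ k :: binDecAux n (k + 1)
  else
    [n - 2 ^ k + 1]
termination_by n.toNat - 2 ^ k
decreasing_by
  rename_i h
  have h2 : ((2 ^ (k + 1) : Nat) : Int) ≤ n := by push_cast; linarith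
  have hN : 2 ^ (k + 1) ≤ n.toNat := by omega
  exact Nat.sub_lt_sub_left
    (Nat.lt_of_lt_of_le (Nat.pow_lt_pow_right one_lt_two (Nat.lt_succ_self k)) hN)
    (Nat.pow_lt_pow_right one_lt_two (Nat.lt_succ_self k))

def binaryDecomposition (n : Int) : List Int := binDecAux n 0

-- Python's 'lst[j] += v' for an in-range j (both ports only use it with j in range).
def addAt (l : List Int) (j : Nat) (v : Int) : List Int := l.set j (l.getD j 0 + v)

-- Phase 1 appends each decomposition to newList and records the running length in num_i
-- (A presizes num_i with zeros and writes slot i+1; appending the same values is identical).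
-- In phase 2 the guard makes both indexings in range, so getD / addAt are Python-exact.
def transInv (numList : List Int) (indexNum : List Int) : List Int :=
  let st := numList.foldl
    (fun (st : List Int × List Int) x =>
      (st.1 ++ binaryDecomposition x,
       st.2 ++ [((st.1 ++ binaryDecomposition x).length : Int)]))
    ([], [(0 : Int)])
  let newList := st.1
  let num_i := st.2
  (PySem.List.pyRange ((numList.length : Int) - 1) (-1) (-1)).foldl
    (fun sl j =>
      indexNum.foldl
        (fun sl2 i =>
          if num_i.getD j.toNat 0 < i ∧ i ≤ num_i.getD (j.toNat + 1) 0 then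
            addAt sl2 j.toNat (newList.getD (i - 1).toNat 0)
          else sl2)
        sl)
    (List.replicate numList.length 0)

-- ===== PORT B =====
-- Source B: parts = [_decomp(n) for n in numList]; one enumerate pass builds newList and the
-- owner table; each index is then dispatched in O(1). The 0 < i ≤ total guard makes all
-- indexings in range, so getD / addAt are Python-exact.
def transInv_alt (numList : List Int) (indexNum : List Int) : List Int :=
  let parts := numList.map binaryDecomposition
  let st := (PySem.List.enumerate parts 0).foldl
    (fun (st : List Int × List Int) jp =>
      (st.1 ++ jp.2, st.2 ++ List.replicate jp.2.length jp.1))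
    ([], [])
  let newList := st.1
  let owner := st.2
  indexNum.foldl
    (fun out i =>
      if 0 < i ∧ i ≤ (newList.length : Int) then
        addAt out (owner.getD (i - 1).toNat 0).toNat (newList.getD (i - 1).toNat 0)
      else out)
    (List.replicate numList.length 0)

-- ===== PRECONDITION & SPEC =====
def Spec_transInv (numList : List Int) (indexNum : List Int) (out : List Int) : Prop := out = transInv_alt numList indexNum
instance (numList : List Int) (indexNum : List Int) (out : List Int) : Decidable (Spec_transInv numList indexNum out) := by unfold Spec_transInv; infer_instance

-- ===== CLAIM (what is proved, stated in full; the proofs are below) =====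
def Claim_equal_transInv : Prop := ∀ (numList : List Int) (indexNum : List Int), Dom_transInv numList indexNum → Spec_transInv numList indexNum (transInv numList indexNum)

-- ===== LEMMAS AND PROOFS =====

-- cumulative segment boundaries starting from base length b
def cutsFrom (b : Nat) : List (List Int) → List Int
  | [] => []
  | p :: ps => ((b + p.length : Nat) : Int) :: cutsFrom (b + p.length) ps

-- owner table: segment number (starting at s) of each flattened position
def ownerFrom (s : Int) : List (List Int) → List Int
  | [] => []
  | p :: ps => List.replicate p.length s ++ ownerFrom (s + 1) ps

lemma foldA_eq (l : List Int) (acc cs : List Int) :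
    l.foldl
      (fun (st : List Int × List Int) x =>
        (st.1 ++ binaryDecomposition x,
         st.2 ++ [((st.1 ++ binaryDecomposition x).length : Int)]))
      (acc, cs)
    = (acc ++ (l.map binaryDecomposition).flatten,
       cs ++ cutsFrom acc.length (l.map binaryDecomposition)) := by
  induction l generalizing acc cs with
  | nil => simp [cutsFrom]
  | cons x xs ih =>
    simp only [List.foldl_cons, List.map_cons, List.flatten_cons, cutsFrom]
    rw [ih]
    simp [List.append_assoc]

lemma foldB_eq (l : List (List Int)) (s : Int) (acc ow : List Int) :
    (PySem.List.enumerate l s).foldl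
      (fun (st : List Int × List Int) jp =>
        (st.1 ++ jp.2, st.2 ++ List.replicate jp.2.length jp.1))
      (acc, ow)
    = (acc ++ l.flatten, ow ++ ownerFrom s l) := by
  induction l generalizing s acc ow with
  | nil => simp [PySem.List.enumerate_nil, ownerFrom]
  | cons p ps ih =>
    rw [PySem.List.enumerate_cons]
    simp only [List.foldl_cons, List.flatten_cons, ownerFrom]
    rw [ih]
    simp [List.append_assoc]

lemma ownerFrom_length (s : Int) (ps : List (List Int)) :
    (ownerFrom s ps).length = ps.flatten.length := by
  induction ps generalizing s with
  | nil => simp [ownerFrom]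
  | cons p ps ih => simp [ownerFrom, ih]

lemma ownerFrom_mem_ge {x s : Int} {ps : List (List Int)} (h : x ∈ ownerFrom s ps) : s ≤ x := by
  induction ps generalizing s with
  | nil => simp [ownerFrom] at h
  | cons p ps ih =>
    simp only [ownerFrom, List.mem_append, List.mem_replicate] at h
    rcases h with h | h
    · omega
    · have := ih h; omega

-- the key bridge: A's cumulative-bounds guard for segment j holds iff the index is in
-- range and the owner table maps it to segment j
lemma bridge (ps : List (List Int)) (b : Nat) (s : Int) (j : Nat) (hj : j < ps.length)
    (i : Int) :
    (((b : Int) :: cutsFrom b ps).getD j 0 < i ∧ i ≤ ((b : Int) :: cutsFrom b ps).getD (j + 1) 0)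
    ↔ ((b : Int) < i ∧ i ≤ (b : Int) + ps.flatten.length ∧
        (ownerFrom s ps).getD (i - 1 - b).toNat 0 = s + j) := by
  induction ps generalizing b s j with
  | nil => simp at hj
  | cons p ps ih =>
    match j with
    | 0 =>
      -- LHS: b < i ∧ i ≤ b + p.length
      simp only [cutsFrom, ownerFrom, List.flatten_cons, List.getD_cons_zero,
        List.getD_cons_succ, List.length_append]
      constructor
      · rintro ⟨h1, h2⟩
        push_cast at h2 ⊢
        refine ⟨h1, by omega, ?_⟩
        have hpos : (i - 1 - b).toNat < p.length := by omega
        rw [List.getD_append _ _ _ _ (by simpa using hpos)]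
        simp only [List.getD_eq_getElem?_getD, List.getElem?_replicate]
        rw [if_pos (by omega)]
        simp
      · rintro ⟨h1, h2, h3⟩
        push_cast at h2 ⊢
        refine ⟨h1, ?_⟩
        by_contra hgt
        push_neg at hgt
        -- position lands in the tail owner, whose entries are ≥ s+1
        have hge : p.length ≤ (i - 1 - b).toNat := by omega
        rw [List.getD_append_right _ _ _ _ (by simpa using hge)] at h3
        simp only [List.length_replicate] at h3
        have hlen : (i - 1 - b).toNat - p.length < (ownerFrom (s+1) ps).length := by
          rw [ownerFrom_length]; omega
        rw [List.getD_eq_getElem _ _ hlen] at h3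
        have := ownerFrom_mem_ge (List.getElem_mem hlen)
        omega
    | j' + 1 =>
      simp only [List.length_cons] at hj
      have ih' := ih (b + p.length) (s + 1) j' (by omega)
      simp only [cutsFrom, ownerFrom, List.flatten_cons, List.getD_cons_succ,
        List.length_append] at ih' ⊢
      push_cast at ih' ⊢
      rw [ih']
      constructor
      · rintro ⟨h1, h2, h3⟩
        refine ⟨by omega, by omega, ?_⟩
        have hge : p.length ≤ (i - 1 - b).toNat := by omega
        rw [List.getD_append_right _ _ _ _ (by simpa using hge)]
        simp only [List.length_replicate]
        have heq : (i - 1 - b).toNat - p.length = (i - 1 - ((b : Int) + p.length)).toNat := by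
          omega
        rw [heq, h3]
        ring
      · rintro ⟨h1, h2, h3⟩
        have hge : p.length ≤ (i - 1 - b).toNat := by
          by_contra hlt
          push_neg at hlt
          rw [List.getD_append _ _ _ _ (by simpa using hlt)] at h3
          simp only [List.getD_eq_getElem?_getD, List.getElem?_replicate] at h3
          rw [if_pos (by omega)] at h3
          simp at h3
          omega
        rw [List.getD_append_right _ _ _ _ (by simpa using hge)] at h3
        simp only [List.length_replicate] at h3
        have heq : (i - 1 - b).toNat - p.length = (i - 1 - ((b : Int) + p.length)).toNat := by
          omega
        rw [heq] at h3
        refine ⟨by omega, by omega, by rw [h3]; ring⟩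


lemma addAt_length (l : List Int) (j : Nat) (v : Int) : (addAt l j v).length = l.length := by
  simp [addAt]

lemma addAt_getD (l : List Int) (j : Nat) (v : Int) (k : Nat) :
    (addAt l j v).getD k 0 = if k = j ∧ j < l.length then l.getD k 0 + v else l.getD k 0 := by
  simp only [addAt, List.getD, List.getElem?_set]
  split_ifs with h1 h2 h3 h4 h5 <;> simp_all

lemma addAt_zero (l : List Int) (j : Nat) : addAt l j 0 = l := by
  unfold addAt
  rcases Nat.lt_or_ge j l.length with h | h
  · simp [List.getD, List.getElem?_eq_getElem h]
  · exact List.set_eq_of_length_le h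

lemma addAt_addAt (l : List Int) (j : Nat) (a b : Int) :
    addAt (addAt l j a) j b = addAt l j (a + b) := by
  unfold addAt
  rcases Nat.lt_or_ge j l.length with h | h
  · rw [List.set_set]
    congr 1
    simp only [List.getD]
    rw [List.getElem?_set_self']
    simp [List.getElem?_eq_getElem h]
    ring
  · rw [List.set_eq_of_length_le h, List.set_eq_of_length_le h, List.set_eq_of_length_le h]

lemma innerA_eq (idx : List Int) (j : Nat) (sl : List Int) (v : Int → Int)
    (lo hi : Int) :
    idx.foldl (fun sl2 i => if lo < i ∧ i ≤ hi then addAt sl2 j (v i) else sl2) sl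
    = addAt sl j ((idx.map (fun i => if lo < i ∧ i ≤ hi then v i else 0)).sum) := by
  induction idx generalizing sl with
  | nil => simp [addAt_zero]
  | cons i idx ih =>
    simp only [List.foldl_cons, List.map_cons, List.sum_cons]
    split_ifs with h
    · rw [ih, addAt_addAt]
    · rw [ih]; simp

lemma outerA_length (js : List Int) (S : Nat → Int) (sl : List Int) :
    (js.foldl (fun sl j => addAt sl j.toNat (S j.toNat)) sl).length = sl.length := by
  induction js generalizing sl with
  | nil => rfl
  | cons j js ih => simp only [List.foldl_cons]; rw [ih, addAt_length]

lemma outerA_getD (js : List Int) (S : Nat → Int) (sl : List Int) (k : Nat)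
    (hnodup : (js.map Int.toNat).Nodup) (hlt : ∀ j ∈ js, j.toNat < sl.length) :
    (js.foldl (fun sl j => addAt sl j.toNat (S j.toNat)) sl).getD k 0
    = sl.getD k 0 + (if k ∈ js.map Int.toNat then S k else 0) := by
  induction js generalizing sl with
  | nil => simp
  | cons j js ih =>
    simp only [List.map_cons, List.nodup_cons] at hnodup
    simp only [List.foldl_cons]
    rw [ih _ hnodup.2 (fun x hx => by rw [addAt_length]; exact hlt x (List.mem_cons_of_mem _ hx))]
    rw [addAt_getD]
    have hjl : j.toNat < sl.length := hlt j (List.mem_cons_self ..)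
    by_cases hk : k = j.toNat
    · subst hk
      simp [hjl, hnodup.1]
    · simp only [List.map_cons, List.mem_cons]
      rw [if_neg (by tauto)]
      simp [hk]

lemma foldB_length (idx : List Int) (gB : Int → Prop) [DecidablePred gB]
    (pos : Int → Nat) (v : Int → Int) (out : List Int) :
    (idx.foldl (fun o i => if gB i then addAt o (pos i) (v i) else o) out).length
      = out.length := by
  induction idx generalizing out with
  | nil => rfl
  | cons i idx ih =>
    simp only [List.foldl_cons]
    split_ifs
    · rw [ih, addAt_length]
    · rw [ih]

lemma foldB_getD (idx : List Int) (gB : Int → Prop) [DecidablePred gB]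
    (pos : Int → Nat) (v : Int → Int) (out : List Int) (k : Nat) :
    (idx.foldl (fun o i => if gB i then addAt o (pos i) (v i) else o) out).getD k 0
    = out.getD k 0 + (idx.map (fun i => if gB i ∧ pos i = k ∧ pos i < out.length then v i else 0)).sum := by
  induction idx generalizing out with
  | nil => simp
  | cons i idx ih =>
    simp only [List.foldl_cons, List.map_cons, List.sum_cons]
    by_cases h : gB i
    · rw [if_pos h, ih, addAt_getD, addAt_length]
      by_cases hpk : pos i = k ∧ pos i < out.length
      · rw [if_pos ⟨hpk.1.symm, hpk.1 ▸ hpk.2⟩, if_pos ⟨h, hpk⟩]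
        ring
      · rw [if_neg (by tauto), if_neg (by tauto)]
        ring
    · rw [if_neg h, ih, if_neg (by tauto)]
      ring

-- facts about the countdown range
lemma js_mem (n : Nat) (j : Int) :
    j ∈ PySem.List.pyRange ((n : Int) - 1) (-1) (-1) ↔ 0 ≤ j ∧ j < n := by
  rw [PySem.List.mem_pyRange_neg_one]
  omega

lemma js_nodup (n : Nat) :
    ((PySem.List.pyRange ((n : Int) - 1) (-1) (-1)).map Int.toNat).Nodup := by
  apply List.Nodup.map_on
  · intro x hx y hy hxy
    rw [js_mem] at hx hy
    omega
  · rw [PySem.List.pyRange_neg_one_eq_reverse]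
    exact List.nodup_reverse.mpr (PySem.List.nodup_pyRange_one _ _)

lemma js_map_mem (n k : Nat) :
    k ∈ (PySem.List.pyRange ((n : Int) - 1) (-1) (-1)).map Int.toNat ↔ k < n := by
  simp only [List.mem_map]
  constructor
  · rintro ⟨j, hj, rfl⟩
    rw [js_mem] at hj
    omega
  · intro hk
    exact ⟨(k : Int), (js_mem n _).mpr (by omega), by omega⟩

lemma owner_getD_nonneg (parts : List (List Int)) (t : Nat) :
    0 ≤ (ownerFrom 0 parts).getD t 0 := by
  rcases Nat.lt_or_ge t (ownerFrom 0 parts).length with h | h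
  · rw [List.getD_eq_getElem _ _ h]
    exact ownerFrom_mem_ge (List.getElem_mem h)
  · rw [List.getD_eq_default _ _ h]

lemma transInv_eq_alt (numList indexNum : List Int) :
    transInv numList indexNum = transInv_alt numList indexNum := by
  simp only [transInv, transInv_alt]
  rw [foldA_eq, foldB_eq]
  simp only [List.nil_append, List.length_nil]
  set parts := numList.map binaryDecomposition with hparts
  set NL := parts.flatten with hNL
  set OW := ownerFrom 0 parts with hOW
  set n := numList.length with hn
  have hplen : parts.length = n := by rw [hparts, hn, List.length_map]
  -- A's cut list: [0] ++ cutsFrom 0 parts = 0 :: cutsFrom 0 parts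
  have hcons : ([(0 : Int)] ++ cutsFrom 0 parts) = ((0 : Nat) : Int) :: cutsFrom 0 parts := by
    simp
  rw [hcons]
  set NI := ((0 : Nat) : Int) :: cutsFrom 0 parts with hNI
  set SS : Nat → Int := fun t => (indexNum.map
      (fun i => if NI.getD t 0 < i ∧ i ≤ NI.getD (t + 1) 0 then NL.getD (i - 1).toNat 0 else 0)).sum
    with hSS
  -- rewrite the inner loop of A into a single addAt
  have hfun : (fun (sl : List Int) (j : Int) =>
      indexNum.foldl
        (fun sl2 i =>
          if NI.getD j.toNat 0 < i ∧ i ≤ NI.getD (j.toNat + 1) 0 then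
            addAt sl2 j.toNat (NL.getD (i - 1).toNat 0)
          else sl2)
        sl)
      = (fun sl j => addAt sl j.toNat (SS j.toNat)) := by
    funext sl j
    rw [hSS]
    exact innerA_eq indexNum j.toNat sl _ _ _
  rw [hfun]
  apply List.ext_getElem
  · rw [outerA_length _ SS, foldB_length]
  · intro k hk1 hk2
    have hkn : k < n := by
      have := hk1
      rw [outerA_length _ SS, List.length_replicate] at this
      exact this
    rw [← List.getD_eq_getElem _ 0 hk1, ← List.getD_eq_getElem _ 0 hk2]
    rw [outerA_getD _ SS _ _ (js_nodup n)
      (fun j hj => by rw [List.length_replicate]; rw [js_mem] at hj; omega)]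
    rw [foldB_getD]
    rw [if_pos ((js_map_mem n k).mpr hkn)]
    simp only [List.length_replicate]
    have hrep : (List.replicate n (0:Int)).getD k 0 = 0 := by
      rw [List.getD_eq_getElem _ _ (by simpa using hkn), List.getElem_replicate]
    rw [hrep]
    simp only [zero_add]
    -- pointwise equality of the two summand functions
    rw [hSS]
    beta_reduce
    simp only [hNI, hOW, hNL, Nat.cast_zero]
    congr 1
    apply List.map_congr_left
    intro i _
    have hbr := bridge parts 0 0 k (by omega) i
    simp only [Nat.cast_zero, zero_add, sub_zero] at hbr
    rw [if_congr hbr rfl rfl]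
    have hnn : 0 ≤ (ownerFrom 0 parts).getD (i - 1).toNat 0 := owner_getD_nonneg parts _
    by_cases hg : 0 < i ∧ i ≤ (parts.flatten.length : Int)
    · by_cases ho : (ownerFrom 0 parts).getD (i - 1).toNat 0 = (k : Int)
      · rw [if_pos ⟨hg.1, hg.2, ho⟩, if_pos ⟨hg, by omega, by omega⟩]
      · rw [if_neg (fun hc => ho (by omega)), if_neg (fun hc => ho (by omega))]
    · rw [if_neg (by tauto), if_neg (by tauto)]

-- ===== VERDICT (by name: the statement is the Claim_ definition above) =====
theorem transInv_spec : Claim_equal_transInv := by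
  intro numList indexNum _
  unfold Spec_transInv
  exact transInv_eq_alt numList indexNum
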